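-- pv_equiv track=rewrite | github.com/daniel-reich/ubiquitous-fiesta | 8NyNftbNXd6CZCDXf_4.py | get_coin_balances
-- ===== SOURCE A (Python) =====
-- def get_coin_balances(lst1, lst2):
--   A=[x for x in zip(lst1, lst2)]
--   a, b=3, 3
--   for x, y in A:
--     if (x, y) == ('share', 'share'):
--       a+=2
--       b+=2
--     elif (x, y) ==('share', 'steal'):
--       a-=1
--       b+=3
--     elif (x, y) == ('steal', 'share'):
--       a+=3
--       b-=1
--     else:
--       a+=0
--       b+=0
--   return [a,b]
-- ===== SOURCE B (Python) =====
-- from collections import Counter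
--
-- def get_coin_balances(lst1, lst2):
--   c = Counter(zip(lst1, lst2))
--   ss = c[('share', 'share')]
--   st = c[('share', 'steal')]
--   ts = c[('steal', 'share')]
--   return [3 + 2*ss - st + 3*ts, 3 + 2*ss + 3*st - ts]
-- ===== Notes on version B (the rewrite author's own statement) =====
-- stated objective: simpler
-- what changed: Replaces the branch-per-element accumulator loop with a Counter tally of the zipped pairs followed by a closed-form arithmetic expression for both balances.
import Mathlib
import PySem

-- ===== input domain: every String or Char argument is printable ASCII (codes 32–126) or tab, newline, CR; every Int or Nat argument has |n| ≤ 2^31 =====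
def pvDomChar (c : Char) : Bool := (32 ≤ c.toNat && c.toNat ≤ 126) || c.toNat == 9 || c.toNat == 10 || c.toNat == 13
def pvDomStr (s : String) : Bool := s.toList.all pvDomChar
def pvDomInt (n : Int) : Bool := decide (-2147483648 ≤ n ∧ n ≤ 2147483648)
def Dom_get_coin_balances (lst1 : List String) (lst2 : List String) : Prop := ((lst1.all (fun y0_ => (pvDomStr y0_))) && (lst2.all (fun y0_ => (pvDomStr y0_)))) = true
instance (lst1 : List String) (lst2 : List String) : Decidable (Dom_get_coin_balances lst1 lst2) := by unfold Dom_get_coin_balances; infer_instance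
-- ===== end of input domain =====

-- B replaces A's branch-per-element accumulator loop with a tally of the zipped
-- pairs (Counter) plus a closed-form arithmetic expression; objective: simpler.


-- ===== PORT A =====
-- literal transliteration: build A = zip(lst1,lst2), then a branch-per-pair fold
def gcbStep (st : Int × Int) (xy : String × String) : Int × Int :=
  let (a, b) := st
  if xy = ("share", "share") then (a + 2, b + 2)
  else if xy = ("share", "steal") then (a - 1, b + 3)
  else if xy = ("steal", "share") then (a + 3, b - 1)
  else (a + 0, b + 0)

def get_coin_balances (lst1 : List String) (lst2 : List String) : List Int :=
  let A := lst1.zip lst2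
  let ab : Int × Int := A.foldl gcbStep (3, 3)
  [ab.1, ab.2]

-- ===== PORT B =====
-- transliteration of Source B: Counter(zip(...))[k] = number of occurrences of k
def get_coin_balances_alt (lst1 : List String) (lst2 : List String) : List Int :=
  let z := lst1.zip lst2
  let ss : Int := z.count ("share", "share")
  let st : Int := z.count ("share", "steal")
  let ts : Int := z.count ("steal", "share")
  [3 + 2 * ss - st + 3 * ts, 3 + 2 * ss + 3 * st - ts]

-- ===== PRECONDITION & SPEC =====
def Spec_get_coin_balances (lst1 : List String) (lst2 : List String) (out : List Int) : Prop := out = get_coin_balances_alt lst1 lst2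
instance (lst1 : List String) (lst2 : List String) (out : List Int) : Decidable (Spec_get_coin_balances lst1 lst2 out) := by unfold Spec_get_coin_balances; infer_instance

-- ===== CLAIM (what is proved, stated in full; the proofs are below) =====
def Claim_equal_get_coin_balances : Prop := ∀ (lst1 : List String) (lst2 : List String), Dom_get_coin_balances lst1 lst2 → Spec_get_coin_balances lst1 lst2 (get_coin_balances lst1 lst2)

-- ===== LEMMAS AND PROOFS =====

theorem gcb_fold_eq (z : List (String × String)) (a b : Int) :
    z.foldl gcbStep (a, b)
    = (a + 2 * (z.count ("share", "share") : Int) - (z.count ("share", "steal") : Int)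
         + 3 * (z.count ("steal", "share") : Int),
       b + 2 * (z.count ("share", "share") : Int) + 3 * (z.count ("share", "steal") : Int)
         - (z.count ("steal", "share") : Int)) := by
  induction z generalizing a b with
  | nil => simp
  | cons p t ih =>
    rw [List.foldl_cons]
    by_cases h1 : p = ("share", "share")
    · rw [show gcbStep (a, b) p = (a + 2, b + 2) from by simp [gcbStep, h1], ih]
      simp [h1, List.count_cons]
      constructor <;> ring
    · by_cases h2 : p = ("share", "steal")
      · rw [show gcbStep (a, b) p = (a - 1, b + 3) from by simp [gcbStep, h1, h2], ih]
        simp [h1, h2, List.count_cons]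
        constructor <;> ring
      · by_cases h3 : p = ("steal", "share")
        · rw [show gcbStep (a, b) p = (a + 3, b - 1) from by simp [gcbStep, h1, h2, h3], ih]
          simp [h1, h2, h3, List.count_cons]
          constructor <;> ring
        · rw [show gcbStep (a, b) p = (a, b) from by simp [gcbStep, h1, h2, h3], ih]
          simp [h1, h2, h3, List.count_cons]

-- ===== VERDICT (by name: the statement is the Claim_ definition above) =====
theorem get_coin_balances_spec : Claim_equal_get_coin_balances := by
  intro lst1 lst2 _
  unfold Spec_get_coin_balances get_coin_balances get_coin_balances_alt
  simp only [gcb_fold_eq]
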